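-- pv_equiv track=rewrite | github.com/banana-galaxy/challenges | challenge14(treasure)/solutions/nerdypro.py | solution
-- ===== SOURCE A (Python) =====
-- def solution(value1,weight1,value2,weight2,maxWeight):
--     items = [[value1,weight1],[value2,weight2]]
--
--     items_weight = sorted(items, key = lambda x: x[1], reverse=False)
--     items_value = sorted(items, key = lambda x: x[0], reverse=True)
--
--     totalWeight = 0
--     max1 = 0
--     for item in items_weight:
--         totalWeight+=item[1]
--         if totalWeight>maxWeight:
--             break
--         max1+=item[0]
--
--     totalWeight = 0
--     max2 = 0
--     for item in items_value:
--         totalWeight+=item[1]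
--         if totalWeight>maxWeight:
--             break
--         max2+=item[0]
--
--     return max(max1,max2)
-- ===== SOURCE B (Python) =====
-- def solution(value1, weight1, value2, weight2, maxWeight):
--     # closed form: no sorting, no loops.
--     total = weight1 + weight2
--     # lighter item (weight tie -> item1, as a stable sort would order it)
--     lv, lw = (value1, weight1) if weight1 <= weight2 else (value2, weight2)
--     # higher-value item (value tie -> item1, as a stable reverse sort would order it)
--     hv, hw = (value1, weight1) if value1 >= value2 else (value2, weight2)
--     max1 = 0 if lw > maxWeight else (lv if total > maxWeight else value1 + value2)
--     max2 = 0 if hw > maxWeight else (hv if total > maxWeight else value1 + value2)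
--     return max(max1, max2)
-- ===== Notes on version B (the rewrite author's own statement) =====
-- stated objective: simpler
-- what changed: Replaces the two sort-then-greedy-loop passes with a direct closed-form conditional: pick the lighter-by-weight and higher-by-value item (ties toward item1, matching the stable sorts) and compute each pass's result with two comparisons, no sorting or iteration.
import Mathlib
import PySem

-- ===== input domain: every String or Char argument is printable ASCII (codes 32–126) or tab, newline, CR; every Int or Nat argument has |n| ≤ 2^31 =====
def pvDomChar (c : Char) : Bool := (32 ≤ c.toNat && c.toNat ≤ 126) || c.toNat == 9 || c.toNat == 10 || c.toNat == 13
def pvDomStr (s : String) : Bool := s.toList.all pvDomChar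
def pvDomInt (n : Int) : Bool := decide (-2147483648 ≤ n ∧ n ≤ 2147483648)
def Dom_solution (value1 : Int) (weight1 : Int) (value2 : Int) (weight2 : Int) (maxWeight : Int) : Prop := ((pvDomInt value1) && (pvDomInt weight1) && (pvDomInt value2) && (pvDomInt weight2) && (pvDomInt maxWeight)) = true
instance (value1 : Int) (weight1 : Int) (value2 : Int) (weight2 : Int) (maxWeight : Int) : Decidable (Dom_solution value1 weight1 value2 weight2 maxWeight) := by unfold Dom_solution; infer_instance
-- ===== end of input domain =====

-- ===== PORT A =====
-- for-loop with break: structural recursion over the sorted list, state (totalWeight, max)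
def solLoop (maxWeight : Int) : List (Int × Int) → Int → Int → Int
  | [], _, m => m
  | item :: rest, tw, m =>
    let tw' := tw + item.2
    if tw' > maxWeight then m else solLoop maxWeight rest tw' (m + item.1)

def solution (value1 : Int) (weight1 : Int) (value2 : Int) (weight2 : Int) (maxWeight : Int) : Int :=
  let items : List (Int × Int) := [(value1, weight1), (value2, weight2)]
  let items_weight := PySem.List.sorted items (fun x => x.2) false
  let items_value := PySem.List.sorted items (fun x => x.1) true
  let max1 := solLoop maxWeight items_weight 0 0
  let max2 := solLoop maxWeight items_value 0 0
  max max1 max2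

-- ===== PORT B =====
def solution_alt (value1 : Int) (weight1 : Int) (value2 : Int) (weight2 : Int) (maxWeight : Int) : Int :=
  let total := weight1 + weight2
  let l := if weight1 ≤ weight2 then (value1, weight1) else (value2, weight2)
  let h := if value1 ≥ value2 then (value1, weight1) else (value2, weight2)
  let max1 := if l.2 > maxWeight then 0 else if total > maxWeight then l.1 else value1 + value2
  let max2 := if h.2 > maxWeight then 0 else if total > maxWeight then h.1 else value1 + value2
  max max1 max2

-- ===== PRECONDITION & SPEC =====
def Spec_solution (value1 : Int) (weight1 : Int) (value2 : Int) (weight2 : Int) (maxWeight : Int) (out : Int) : Prop := out = solution_alt value1 weight1 value2 weight2 maxWeight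
instance (value1 : Int) (weight1 : Int) (value2 : Int) (weight2 : Int) (maxWeight : Int) (out : Int) : Decidable (Spec_solution value1 weight1 value2 weight2 maxWeight out) := by unfold Spec_solution; infer_instance

-- ===== CLAIM (what is proved, stated in full; the proofs are below) =====
def Claim_equal_solution : Prop := ∀ (value1 : Int) (weight1 : Int) (value2 : Int) (weight2 : Int) (maxWeight : Int), Dom_solution value1 weight1 value2 weight2 maxWeight → Spec_solution value1 weight1 value2 weight2 maxWeight (solution value1 weight1 value2 weight2 maxWeight)

-- ===== LEMMAS AND PROOFS =====

-- header: B replaces the two stable sorts and greedy break-loops by an O(1) closed-form conditional cascade; proved equal to A on all inputs.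

-- ===== VERDICT (by name: the statement is the Claim_ definition above) =====
theorem solution_spec : Claim_equal_solution := by
  intro v1 w1 v2 w2 mW _
  unfold Spec_solution solution solution_alt
  simp only [PySem.List.sorted_eq_foldl_insertBy, PySem.List.sorted_rev_eq_foldl_insertBy,
    List.foldl, PySem.List.insertBy]
  split_ifs <;> simp_all [solLoop] <;> omega
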